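-- pv_equiv track=rewrite | github.com/wherculano/Python_Code_Interview | reversed_words.py | reserved_words_constant_time_with_constant_length
-- ===== SOURCE A (Python) =====
-- from collections import deque
-- from typing import Iterable
--
-- def reserved_words_constant_time_with_constant_length(frase: str) -> Iterable:
--     """
--     >>> list(reserved_words_constant_time_with_constant_length('the sky is blue'))
--     ['blue', 'is', 'sky', 'the']
--
--     """
--     palavra = deque()
--
--     for letra in reversed(frase):
--         if letra == ' ':
--             yield ''.join(palavra)
--             palavra.clear()
--         else:
--             palavra.appendleft(letra)
--     yield ''.join(palavra)
-- ===== SOURCE B (Python) =====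
-- def reserved_words_constant_time_with_constant_length(frase: str):
--     words = frase.split(' ')
--     yield from reversed(words)
-- ===== Notes on version B (the rewrite author's own statement) =====
-- stated objective: simpler
-- what changed: B splits the string once on the single-space separator and yields the resulting word list back-to-front, replacing A's character-by-character reversed scan that assembles each word in a deque.
import Mathlib
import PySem

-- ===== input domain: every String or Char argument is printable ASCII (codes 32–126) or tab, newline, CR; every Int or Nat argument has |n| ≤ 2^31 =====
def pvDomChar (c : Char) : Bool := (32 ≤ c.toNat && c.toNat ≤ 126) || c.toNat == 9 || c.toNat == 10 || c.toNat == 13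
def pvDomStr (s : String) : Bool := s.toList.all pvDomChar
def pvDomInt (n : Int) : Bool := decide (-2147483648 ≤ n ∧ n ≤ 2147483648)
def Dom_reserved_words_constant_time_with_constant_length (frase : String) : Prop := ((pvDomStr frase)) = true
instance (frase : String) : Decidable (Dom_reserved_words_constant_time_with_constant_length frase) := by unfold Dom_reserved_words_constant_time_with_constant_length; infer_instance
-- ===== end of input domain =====

-- B yields the words of frase.split(' ') in reverse order instead of A's reversed
-- character scan that assembles each word in a deque; return-value equivalence
-- (both generators' yields collected as a list).

-- ===== PORT A =====
-- one loop step: letra == ' ' → yield ''.join(palavra), clear; else palavra.appendleft(letra)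
def pvStepA (st : List Char × List String) (letra : Char) : List Char × List String :=
  if letra = ' ' then ([], st.2 ++ [String.ofList st.1])
  else (letra :: st.1, st.2)

def reserved_words_constant_time_with_constant_length (frase : String) : List String :=
  let st := frase.toList.reverse.foldl pvStepA ([], [])
  st.2 ++ [String.ofList st.1]

-- ===== PORT B =====
-- frase.split(' ') with the literal non-empty separator ' ' is exactly PySem.Chars.splitOn on code points
def reserved_words_constant_time_with_constant_length_alt (frase : String) : List String :=
  let words := (PySem.Chars.splitOn frase.toList [' ']).map String.ofList
  words.reverse

-- ===== PRECONDITION & SPEC =====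
def Spec_reserved_words_constant_time_with_constant_length (frase : String) (out : List String) : Prop := out = reserved_words_constant_time_with_constant_length_alt frase
instance (frase : String) (out : List String) : Decidable (Spec_reserved_words_constant_time_with_constant_length frase out) := by unfold Spec_reserved_words_constant_time_with_constant_length; infer_instance

-- ===== CLAIM (what is proved, stated in full; the proofs are below) =====
def Claim_equal_reserved_words_constant_time_with_constant_length : Prop := ∀ (frase : String), Dom_reserved_words_constant_time_with_constant_length frase → Spec_reserved_words_constant_time_with_constant_length frase (reserved_words_constant_time_with_constant_length frase)

-- ===== LEMMAS AND PROOFS =====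

-- reference single-char split on ' '
def pvSplit : List Char → List (List Char)
  | [] => [[]]
  | c :: l =>
    if c = ' ' then [] :: pvSplit l
    else
      match pvSplit l with
      | w :: ws => (c :: w) :: ws
      | [] => [[c]]

theorem pvSplit_ne_nil (l : List Char) : pvSplit l ≠ [] := by
  cases l with
  | nil => simp [pvSplit]
  | cons c l =>
    simp only [pvSplit]
    split
    · simp
    · split <;> simp

theorem pvSplit_no_space (u : List Char) (h : ' ' ∉ u) : pvSplit u = [u] := by
  induction u with
  | nil => rfl
  | cons c l ih =>
    have hc : c ≠ ' ' := fun hc => h (hc ▸ List.mem_cons_self ..)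
    have hl : ' ' ∉ l := fun hm => h (List.mem_cons_of_mem _ hm)
    simp [pvSplit, hc, ih hl]

theorem pvSplit_append_space (u v : List Char) :
    pvSplit (u ++ ' ' :: v) = pvSplit u ++ pvSplit v := by
  induction u with
  | nil => simp [pvSplit]
  | cons c u ih =>
    by_cases hc : c = ' '
    · simp [pvSplit, hc, ih]
    · simp only [List.cons_append, pvSplit, hc, if_false, ih]
      rcases hu : pvSplit u with _ | ⟨w, ws⟩
      · exact absurd hu (pvSplit_ne_nil u)
      · simp

theorem go_spec : ∀ (fuel : ℕ) (l cur : List Char) (acc : List (List Char)),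
    l.length < fuel → ' ' ∉ cur →
    PySem.Chars.splitOn.go [' '] fuel l cur acc
      = acc.reverse ++ pvSplit (cur.reverse ++ l) := by
  intro fuel
  induction fuel with
  | zero => intro l cur acc h hcur; omega
  | succ n ih =>
    intro l cur acc hlen hcur
    cases l with
    | nil =>
      rw [PySem.Chars.splitOn.go]
      have : ' ' ∉ cur.reverse := by simpa using hcur
      simp [pvSplit_no_space _ this]
      omega
    | cons c rest =>
      rw [PySem.Chars.splitOn.go]
      by_cases hc : c = ' '
      · subst hc
        have hpre : [' '].isPrefixOf (' ' :: rest) = true := by simp [List.isPrefixOf]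
        simp only [hpre, if_true, List.length_cons, List.drop_succ_cons, List.length_nil, List.drop_zero]
        rw [ih rest [] (cur.reverse :: acc) (by simpa using hlen) (by simp)]
        have : ' ' ∉ cur.reverse := by simpa using hcur
        simp [pvSplit_append_space, pvSplit_no_space _ this]
      · have hpre : [' '].isPrefixOf (c :: rest) = false := by
          simp [List.isPrefixOf]; exact fun h => hc h.symm
        simp only [hpre, Bool.false_eq_true, if_false]
        rw [ih rest (c :: cur) acc (by simpa using hlen)
            (by simp only [List.mem_cons, not_or]
                exact ⟨fun h => hc h.symm, hcur⟩)]
        simp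

theorem splitOn_eq_pvSplit (l : List Char) :
    PySem.Chars.splitOn l [' '] = pvSplit l := by
  rw [PySem.Chars.splitOn, go_spec (l.length + 1) l [] [] (by omega) (by simp)]
  simp

theorem foldA_spec : ∀ (r w : List Char) (acc : List String), ' ' ∉ w →
    (r.foldl pvStepA (w, acc)).2 ++ [String.ofList (r.foldl pvStepA (w, acc)).1]
      = acc ++ ((pvSplit (r.reverse ++ w)).reverse).map String.ofList := by
  intro r
  induction r with
  | nil => intro w acc hw; simp [pvSplit_no_space _ hw]
  | cons x r ih =>
    intro w acc hw
    by_cases hx : x = ' '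
    · subst hx
      simp only [List.foldl_cons, pvStepA, if_true, List.reverse_cons]
      rw [ih [] (acc ++ [String.ofList w]) (by simp)]
      simp [pvSplit_append_space, pvSplit_no_space _ hw]
    · simp only [List.foldl_cons, pvStepA, hx, if_false, List.reverse_cons]
      rw [ih (x :: w) acc (by
        simp only [List.mem_cons, not_or]
        exact ⟨fun h => hx h.symm, hw⟩)]
      simp

-- ===== VERDICT (by name: the statement is the Claim_ definition above) =====
theorem reserved_words_constant_time_with_constant_length_spec : Claim_equal_reserved_words_constant_time_with_constant_length := by
  intro frase _
  unfold Spec_reserved_words_constant_time_with_constant_length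
  unfold reserved_words_constant_time_with_constant_length
  unfold reserved_words_constant_time_with_constant_length_alt
  rw [splitOn_eq_pvSplit]
  have := foldA_spec frase.toList.reverse [] [] (by simp)
  simp only [List.append_nil, List.reverse_reverse, List.nil_append] at this
  rw [this, List.map_reverse]
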